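-- pv_equiv track=rewrite | github.com/leifwritescode/Advent | event-24/14.12.2024.py | part_two
-- ===== SOURCE A (Python) =====
-- from collections import defaultdict
--
-- w = 101
--
-- h = 103
--
-- def part_two(grid):
--     cycles = 0
--     max_cycles = w * h
--
--     # we can assume that, if they're arranged like a tree, it will be the first cycle where no two robots share a space
--     while any(len(grid[key]) != 1 for key in grid) and cycles < max_cycles:
--         cycles += 1
--
--         new_grid = defaultdict(list)
--         for pos in grid:
--             for vector in grid[pos]:
--                 new_pos = (pos[0] + vector[0]) % w, (pos[1] + vector[1]) % h
--                 new_grid[new_pos].append(vector)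
--
--         grid = new_grid
--
--     return cycles
-- ===== SOURCE B (Python) =====
-- w = 101
--
-- h = 103
--
-- def part_two(grid):
--     # cycle 0 qualifies iff every cell of the given grid already holds exactly one robot
--     if all(len(vectors) == 1 for vectors in grid.values()):
--         return 0
--     # no simulation: each later cycle's positions are computed in closed form from the
--     # original robots, positions at cycle t being ((x + vx*t) % w, (y + vy*t) % h)
--     robots = [(x, y, vx, vy) for (x, y), vectors in grid.items() for (vx, vy) in vectors]
--     for t in range(1, w * h):
--         positions = {((x + vx * t) % w, (y + vy * t) % h) for x, y, vx, vy in robots}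
--         if len(positions) == len(robots):
--             return t
--     return w * h
-- ===== Notes on version B (the rewrite author's own statement) =====
-- stated objective: faster
-- what changed: A simulates: every cycle it rebuilds a fresh defaultdict of vector lists keyed by position and stops when every list has length 1; B does no simulation at all: after one upfront check of the given grid it flattens it once into (x, y, vx, vy) robots and, for each candidate cycle t, computes every position in closed form as ((x + vx*t) % w, (y + vy*t) % h) into a set whose cardinality is compared with the robot count.
import Mathlib
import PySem

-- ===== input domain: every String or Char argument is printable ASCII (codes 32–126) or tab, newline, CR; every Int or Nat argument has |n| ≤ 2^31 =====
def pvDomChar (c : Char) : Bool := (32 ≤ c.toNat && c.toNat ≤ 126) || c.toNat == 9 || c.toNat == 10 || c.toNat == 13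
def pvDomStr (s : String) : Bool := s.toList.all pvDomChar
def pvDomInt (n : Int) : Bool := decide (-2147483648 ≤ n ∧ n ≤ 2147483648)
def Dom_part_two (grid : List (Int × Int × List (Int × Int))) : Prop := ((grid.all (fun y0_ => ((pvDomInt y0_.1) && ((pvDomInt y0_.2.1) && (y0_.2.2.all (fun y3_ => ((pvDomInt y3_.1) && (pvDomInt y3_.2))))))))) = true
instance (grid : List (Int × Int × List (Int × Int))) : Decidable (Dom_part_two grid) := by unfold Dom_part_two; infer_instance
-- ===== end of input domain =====

-- B replaces A's cycle-by-cycle simulation (a defaultdict of vector lists rebuilt every cycle)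
-- by closed-form positions: the grid is flattened once into (x, y, vx, vy) robots and each
-- candidate cycle t is judged independently via the set of ((x + vx*t) % w, (y + vy*t) % h).

-- The dict argument arrives as an association list; both ports first read it as a Python dict
-- (insertion order, a duplicate key overwrites its value in place), exactly like dict(pairs).
def pvDictOf (grid : List (Int × Int × List (Int × Int))) :
    PySem.Dict (Int × Int) (List (Int × Int)) :=
  PySem.Dict.ofList (grid.map (fun e => ((e.1, e.2.1), e.2.2)))

-- ===== PORT A =====
-- while any(len(grid[key]) != 1 for key in grid)
def pvCondA (g : PySem.Dict (Int × Int) (List (Int × Int))) : Bool :=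
  g.keys.any (fun k => (g.getD k []).length != 1)

-- one body of A's while loop: rebuild new_grid = defaultdict(list); new_grid[new_pos].append(vector)
def pvStepA (g : PySem.Dict (Int × Int) (List (Int × Int))) :
    PySem.Dict (Int × Int) (List (Int × Int)) :=
  g.keys.foldl
    (fun ng pos =>
      (g.getD pos []).foldl
        (fun ng vector =>
          ng.modify (PySem.Int.mod (pos.1 + vector.1) 101, PySem.Int.mod (pos.2 + vector.2) 103)
            [] (· ++ [vector]))
        ng)
    PySem.Dict.empty

-- while cond ∧ cycles < max_cycles; fuel = max_cycles - cycles
def pvLoopA : Nat → PySem.Dict (Int × Int) (List (Int × Int)) → Int → Int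
  | 0, _, cycles => cycles
  | fuel + 1, g, cycles =>
      if pvCondA g then pvLoopA fuel (pvStepA g) (cycles + 1) else cycles

def part_two (grid : List (Int × Int × List (Int × Int))) : Int :=
  pvLoopA 10403 (pvDictOf grid) 0

-- ===== PORT B =====
-- robots = [(x, y, vx, vy) for (x, y), vectors in grid.items() for (vx, vy) in vectors]
def pvRobotsFlat (g : PySem.Dict (Int × Int) (List (Int × Int))) :
    List (Int × Int × Int × Int) :=
  g.items.flatMap (fun kv => kv.2.map (fun v => (kv.1.1, kv.1.2, v.1, v.2)))

-- ((x + vx * t) % w, (y + vy * t) % h)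
def pvPosAt (t : Int) (r : Int × Int × Int × Int) : Int × Int :=
  (PySem.Int.mod (r.1 + r.2.2.1 * t) 101, PySem.Int.mod (r.2.1 + r.2.2.2 * t) 103)

-- len({... for ... in robots}) == len(robots)
def pvDistinctAt (t : Int) (robots : List (Int × Int × Int × Int)) : Bool :=
  (PySem.Set.ofList (robots.map (pvPosAt t))).length == robots.length

-- for t in range(1, w * h): test, return t … ; return w * h
def pvSearchB : List Int → List (Int × Int × Int × Int) → Int
  | [], _ => 10403
  | t :: ts, robots => if pvDistinctAt t robots then t else pvSearchB ts robots

def part_two_alt (grid : List (Int × Int × List (Int × Int))) : Int :=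
  if (pvDictOf grid).values.all (fun vectors => vectors.length == 1) then 0
  else pvSearchB (PySem.List.pyRange 1 (101 * 103) 1) (pvRobotsFlat (pvDictOf grid))

-- ===== PRECONDITION & SPEC =====
def Spec_part_two (grid : List (Int × Int × List (Int × Int))) (out : Int) : Prop :=
  out = part_two_alt grid
instance (grid : List (Int × Int × List (Int × Int))) (out : Int) : Decidable (Spec_part_two grid out) := by
  unfold Spec_part_two; infer_instance

-- ===== CLAIM (what is proved, stated in full; the proofs are below) =====
def Claim_equal_part_two : Prop := ∀ (grid : List (Int × Int × List (Int × Int))), Dom_part_two grid → Spec_part_two grid (part_two grid)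

-- ===== LEMMAS AND PROOFS =====

abbrev PvD := PySem.Dict (Int × Int) (List (Int × Int))
abbrev PvRob := (Int × Int) × (Int × Int)

-- proof-only view of a grid: its (position, vector) robot pairs
def pvRobotsB (g : PvD) : List PvRob :=
  g.items.flatMap (fun kv => kv.2.map (fun v => (kv.1, v)))

-- one incremental move, A-style, of a (position, vector) pair (proof-only helper)
def pvAdvB (r : PvRob) : PvRob :=
  ((PySem.Int.mod (r.1.1 + r.2.1) 101, PySem.Int.mod (r.1.2 + r.2.2) 103), r.2)

-- one robot-move of A's inner loop, on a (position, vector) pair (proof-only helper)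
def pvFoldStep (ng : PvD) (r : PvRob) : PvD :=
  ng.modify (PySem.Int.mod (r.1.1 + r.2.1) 101, PySem.Int.mod (r.1.2 + r.2.2) 103) [] (· ++ [r.2])

-- a flat robot, paired as (closed-form position at cycle t, vector) (proof-only helper)
def pvToPair (t : Int) (r : Int × Int × Int × Int) : PvRob :=
  (pvPosAt t r, (r.2.2.1, r.2.2.2))

-- len(set(xs)) == len(xs) iff xs has no duplicates
theorem pv_setlen_iff (xs : List (Int × Int)) :
    (PySem.Set.ofList xs).length = xs.length ↔ xs.Nodup := by
  induction xs using List.reverseRecOn with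
  | nil => simp [PySem.Set.ofList]
  | append_singleton xs x ih =>
    rw [PySem.Set.ofList_append_singleton]
    by_cases hx : x ∈ PySem.Set.ofList xs
    · rw [PySem.Set.add_of_mem hx]
      have h1 := PySem.Set.length_ofList_le xs
      have h2 : x ∈ xs := (PySem.Set.mem_ofList xs x).1 hx
      constructor
      · intro heq
        exfalso
        rw [List.length_append, List.length_cons, List.length_nil] at heq
        omega
      · intro hnd
        exfalso
        rw [List.nodup_append] at hnd
        exact hnd.2.2 x h2 x (by simp) rfl
    · rw [PySem.Set.add_of_not_mem hx]
      have h2 : x ∉ xs := fun h => hx ((PySem.Set.mem_ofList xs x).2 h)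
      rw [List.length_append, List.length_append, List.nodup_append]
      constructor
      · intro heq
        have h3 : (PySem.Set.ofList xs).length = xs.length := by simpa using heq
        refine ⟨ih.1 h3, by simp, ?_⟩
        intro a ha b hb
        rw [List.mem_singleton] at hb
        subst hb
        exact fun hax => h2 (hax ▸ ha)
      · rintro ⟨h4, -, -⟩
        rw [ih.2 h4]

-- a constant list is duplicate-free iff it has at most one element
theorem pv_nodup_const (k : Int × Int) : ∀ (vs : List (Int × Int)),
    ((vs.map (fun _ => k)).Nodup ↔ vs.length ≤ 1)
  | [] => by simp
  | [v] => by simp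
  | v :: v' :: vs => by simp

-- a position occurring among the flattened (key, vector) pairs is one of the keys
theorem pv_mem_flat_fst {l : List ((Int × Int) × List (Int × Int))} {a : Int × Int}
    (h : a ∈ (l.flatMap (fun kv => kv.2.map (fun v => (kv.1, v)))).map Prod.fst) :
    a ∈ l.map Prod.fst := by
  rw [List.map_flatMap] at h
  obtain ⟨kv, hkv, ha⟩ := List.mem_flatMap.1 h
  rw [List.map_map] at ha
  obtain ⟨v, _, hva⟩ := List.mem_map.1 ha
  exact List.mem_map.2 ⟨kv, hkv, by simpa using hva⟩

-- with distinct keys, the flattened (key, vector) pairs have duplicate-free positions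
-- iff every vector list has at most one element
theorem pv_nodup_flat : ∀ (l : List ((Int × Int) × List (Int × Int))),
    (l.map Prod.fst).Nodup →
    (((l.flatMap (fun kv => kv.2.map (fun v => (kv.1, v)))).map Prod.fst).Nodup ↔
      ∀ kv ∈ l, kv.2.length ≤ 1)
  | [], _ => by simp
  | kv :: l, h => by
    simp only [List.map_cons, List.nodup_cons] at h
    rw [List.flatMap_cons, List.map_append, List.nodup_append]
    have hleft : ((kv.2.map (fun v => (kv.1, v))).map Prod.fst).Nodup ↔ kv.2.length ≤ 1 := by
      rw [List.map_map]
      exact pv_nodup_const kv.1 kv.2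
    have hdisj : ∀ a ∈ (kv.2.map (fun v => (kv.1, v))).map Prod.fst,
        ∀ b ∈ (l.flatMap (fun kv => kv.2.map (fun v => (kv.1, v)))).map Prod.fst, a ≠ b := by
      intro a ha b hb hab
      rw [List.map_map] at ha
      obtain ⟨v, _, hva⟩ := List.mem_map.1 ha
      have ha' : a = kv.1 := by simpa using hva.symm
      exact h.1 (by rw [← ha', hab] at *; exact pv_mem_flat_fst hb)
    rw [pv_nodup_flat l h.2]
    constructor
    · rintro ⟨h1, h2, _⟩
      intro kv0 hkv0
      rcases List.mem_cons.1 hkv0 with rfl | hkv1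
      · exact hleft.1 h1
      · exact h2 kv0 hkv1
    · intro hall
      exact ⟨hleft.2 (hall kv (by simp)), fun kv' hkv' => hall kv' (by simp [hkv']), hdisj⟩

-- A's while-condition is false iff every entry of the dict holds exactly one vector
theorem pv_cond_false_iff (d : PvD) (hnd : d.keys.Nodup) :
    pvCondA d = false ↔ ∀ kv ∈ d.items, kv.2.length = 1 := by
  have hkeys : d.keys = d.items.map Prod.fst := rfl
  unfold pvCondA
  rw [List.any_eq_false]
  constructor
  · intro hf kv hkv
    have hk : kv.1 ∈ d.keys := by
      rw [hkeys]
      exact List.mem_map.2 ⟨kv, hkv, rfl⟩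
    have h1 := hf kv.1 hk
    have hg : d.getD kv.1 [] = kv.2 :=
      PySem.Dict.getD_of_mem_items d (by simpa using hkv) hnd []
    rw [hg] at h1
    simpa using h1
  · intro hall k hk
    rw [hkeys] at hk
    obtain ⟨kv, hkv, rfl⟩ := List.mem_map.1 hk
    have hg : d.getD kv.1 [] = kv.2 :=
      PySem.Dict.getD_of_mem_items d (by simpa using hkv) hnd []
    rw [hg]
    simpa using hall kv hkv

-- appending one vector to a cell of the dict adds exactly that robot to the flattened list
theorem pv_robots_modify (d : PvD) (hnd : d.keys.Nodup) (k : Int × Int) (v : Int × Int) :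
    (pvRobotsB (d.modify k [] (· ++ [v]))).Perm (pvRobotsB d ++ [(k, v)]) := by
  unfold PySem.Dict.modify
  cases hc : d.contains k with
  | false =>
    rw [PySem.Dict.getD_of_not_contains d [] hc]
    unfold pvRobotsB
    rw [PySem.Dict.items_insert_of_not_contains d _ hc]
    simp
  | true =>
    have hsome : ∃ vs, d.get? k = some vs := by
      have h := PySem.Dict.contains_eq_isSome_get? d k
      rw [hc] at h
      exact Option.isSome_iff_exists.1 h.symm
    obtain ⟨vs, hvs⟩ := hsome
    have hgd : d.getD k [] = vs := PySem.Dict.getD_of_get?_eq_some d [] hvs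
    have hmem : (k, vs) ∈ d.items := PySem.Dict.mem_items_of_get?_eq_some d hvs
    obtain ⟨s, t, hst⟩ := List.append_of_mem hmem
    have hkeys : d.keys = s.map Prod.fst ++ k :: t.map Prod.fst := by
      show d.items.map Prod.fst = _
      rw [hst]; simp
    rw [hkeys, List.nodup_append] at hnd
    obtain ⟨hnd1, hnd2, hnd3⟩ := hnd
    have hks : ∀ p ∈ s, p.1 ≠ k := by
      intro p hp
      exact hnd3 p.1 (List.mem_map.2 ⟨p, hp, rfl⟩) k (List.mem_cons_self)
    have hkt : ∀ p ∈ t, p.1 ≠ k := by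
      intro p hp hpk
      exact (List.nodup_cons.1 hnd2).1 (List.mem_map.2 ⟨p, hp, hpk⟩)
    rw [hgd]
    unfold pvRobotsB
    rw [PySem.Dict.items_insert_of_contains d _ hc, hst]
    rw [List.map_append, List.map_cons]
    have hms : s.map (fun p => if (p.1 == k) = true then (k, vs ++ [v]) else p) = s := by
      rw [List.map_congr_left (g := id) ?_, List.map_id]
      intro p hp
      simp [hks p hp]
    have hmt : t.map (fun p => if (p.1 == k) = true then (k, vs ++ [v]) else p) = t := by
      rw [List.map_congr_left (g := id) ?_, List.map_id]
      intro p hp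
      simp [hkt p hp]
    rw [hms, hmt]
    simp only [beq_self_eq_true, if_pos]
    rw [List.flatMap_append, List.flatMap_cons, List.flatMap_append, List.flatMap_cons]
    rw [List.map_append]
    simp only [List.map_singleton, List.append_assoc, List.nil_append, List.cons_append]
    apply List.Perm.append_left
    apply List.Perm.append_left
    exact (List.perm_append_singleton _ _).symm

-- A's rebuild loop, flattened: keys stay duplicate-free and the flattened robots are
-- exactly the moved robots (as a multiset)
theorem pv_fold_invariants : ∀ (L : List PvRob) (d : PvD), d.keys.Nodup →
    (L.foldl pvFoldStep d).keys.Nodup ∧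
    (pvRobotsB (L.foldl pvFoldStep d)).Perm (pvRobotsB d ++ L.map pvAdvB)
  | [], d, hnd => by simp [hnd]
  | r :: L, d, hnd => by
    have hnd' : (pvFoldStep d r).keys.Nodup :=
      PySem.Dict.nodup_keys_insert d _ _ hnd
    obtain ⟨h1, h2⟩ := pv_fold_invariants L (pvFoldStep d r) hnd'
    rw [List.foldl_cons]
    refine ⟨h1, ?_⟩
    have h3 : (pvRobotsB (pvFoldStep d r)).Perm (pvRobotsB d ++ [pvAdvB r]) :=
      pv_robots_modify d hnd _ r.2
    have h5 := h2.trans (h3.append_right (L.map pvAdvB))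
    rw [List.map_cons, List.append_cons]
    exact h5

-- every cell of a rebuilt dict holds at least one vector
theorem pv_fold_nonempty : ∀ (L : List PvRob) (d : PvD),
    (∀ kv ∈ d.items, kv.2 ≠ []) → ∀ kv ∈ (L.foldl pvFoldStep d).items, kv.2 ≠ []
  | [], _, hne => hne
  | r :: L, d, hne => by
    rw [List.foldl_cons]
    apply pv_fold_nonempty L
    intro kv hkv
    rcases (PySem.Dict.mem_items_insert _ _ _ _).1 hkv with h | h
    · rw [h]; simp
    · exact hne kv h.1

-- A's grid rebuild IS the flattened fold
theorem pv_stepA_eq_fold (g : PvD) (hnd : g.keys.Nodup) :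
    pvStepA g = (pvRobotsB g).foldl pvFoldStep PySem.Dict.empty := by
  unfold pvStepA pvRobotsB
  rw [List.foldl_flatMap]
  show (g.items.map Prod.fst).foldl _ _ = _
  rw [List.foldl_map]
  apply PySem.List.foldl_congr_mem
  intro acc kv hkv
  have hg : g.getD kv.1 [] = kv.2 :=
    PySem.Dict.getD_of_mem_items g (by simpa using hkv) hnd []
  rw [hg, List.foldl_map]
  rfl

-- A's condition on any grid decides exactly "some two robots share a cell"
theorem pv_cond_iff_nodup (d : PvD) (hnd : d.keys.Nodup) (hne : ∀ kv ∈ d.items, kv.2 ≠ []) :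
    (pvCondA d = false ↔ ((pvRobotsB d).map Prod.fst).Nodup) := by
  rw [pv_cond_false_iff d hnd]
  unfold pvRobotsB
  rw [pv_nodup_flat d.items hnd]
  constructor
  · intro h kv hkv; exact le_of_eq (h kv hkv)
  · intro h kv hkv
    have h1 := h kv hkv
    have h2 : kv.2.length ≠ 0 := fun h0 => hne kv hkv (List.length_eq_zero_iff.1 h0)
    omega

-- B's set-cardinality test at cycle t decides distinctness of the closed-form positions
theorem pv_distinct_iff (t : Int) (R : List (Int × Int × Int × Int)) :
    pvDistinctAt t R = true ↔ (R.map (pvPosAt t)).Nodup := by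
  unfold pvDistinctAt
  rw [beq_iff_eq]
  rw [show R.length = (R.map (pvPosAt t)).length by simp]
  exact pv_setlen_iff (R.map (pvPosAt t))

-- advancing a closed-form position by one cycle is the closed form at the next cycle
theorem pv_adv_toPair (t : Int) (r : Int × Int × Int × Int) :
    pvAdvB (pvToPair t r) = pvToPair (t + 1) r := by
  unfold pvAdvB pvToPair pvPosAt
  have h1 : ∀ (a v : Int),
      PySem.Int.mod (PySem.Int.mod (a + v * t) 101 + v) 101 = PySem.Int.mod (a + v * (t + 1)) 101 := by
    intro a v
    rw [PySem.Int.mod_eq_emod_of_pos (by norm_num), PySem.Int.mod_eq_emod_of_pos (by norm_num),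
        PySem.Int.mod_eq_emod_of_pos (by norm_num)]
    have : a + v * (t + 1) = (a + v * t) + v := by ring
    rw [this]
    omega
  have h2 : ∀ (a v : Int),
      PySem.Int.mod (PySem.Int.mod (a + v * t) 103 + v) 103 = PySem.Int.mod (a + v * (t + 1)) 103 := by
    intro a v
    rw [PySem.Int.mod_eq_emod_of_pos (by norm_num), PySem.Int.mod_eq_emod_of_pos (by norm_num),
        PySem.Int.mod_eq_emod_of_pos (by norm_num)]
    have : a + v * (t + 1) = (a + v * t) + v := by ring
    rw [this]
    omega
  simp only [Prod.mk.injEq]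
  exact ⟨⟨h1 r.1 r.2.2.1, h2 r.2.1 r.2.2.2⟩, trivial⟩

-- the initial flattened pairs, advanced once, are the closed-form pairs at cycle 1
theorem pv_robotsB_adv_one (d : PvD) :
    (pvRobotsB d).map pvAdvB = (pvRobotsFlat d).map (pvToPair 1) := by
  unfold pvRobotsB pvRobotsFlat
  rw [List.map_flatMap, List.map_flatMap]
  congr 1
  funext kv
  rw [List.map_map, List.map_map]
  apply List.map_congr_left
  intro v _
  show pvAdvB (kv.1, v) = pvToPair 1 (kv.1.1, kv.1.2, v.1, v.2)
  unfold pvAdvB pvToPair pvPosAt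
  simp

-- the two loops agree step for step: A's grid at cycle c holds (as a multiset) exactly the
-- closed-form robots at cycle c, every cell nonempty
theorem pv_loop_eq : ∀ (fuel : Nat) (g : PvD) (R : List (Int × Int × Int × Int)) (c : Int),
    c + fuel = 10403 → g.keys.Nodup → (∀ kv ∈ g.items, kv.2 ≠ []) →
    (pvRobotsB g).Perm (R.map (pvToPair c)) →
    pvLoopA fuel g c = pvSearchB (PySem.List.pyRange c 10403 1) R
  | 0, g, R, c, hc, _, _, _ => by
    rw [PySem.List.pyRange_one_eq_nil (by omega)]
    show c = (10403 : Int)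
    omega
  | fuel + 1, g, R, c, hc, hnd, hne, hperm => by
    have hlt : c < 10403 := by
      have h0 : (0 : Int) ≤ fuel := Int.natCast_nonneg fuel
      omega
    rw [PySem.List.pyRange_one_cons hlt]
    show (if pvCondA g then pvLoopA fuel (pvStepA g) (c + 1) else c) =
      (if pvDistinctAt c R then c
       else pvSearchB (PySem.List.pyRange (c + 1) 10403 1) R)
    have hfst : ((pvRobotsB g).map Prod.fst).Perm (R.map (pvPosAt c)) := by
      have := hperm.map (Prod.fst (α := Int × Int) (β := Int × Int))
      rw [List.map_map] at this
      exact this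
    have halign : pvCondA g = false ↔ pvDistinctAt c R = true := by
      rw [pv_cond_iff_nodup g hnd hne, pv_distinct_iff]
      exact hfst.nodup_iff
    cases hcond : pvCondA g with
    | false =>
      rw [halign.1 hcond]
      simp
    | true =>
      have hd : pvDistinctAt c R = false := by
        cases h : pvDistinctAt c R with
        | false => rfl
        | true =>
          have h2 := halign.2 h
          rw [hcond] at h2
          exact absurd h2 (by decide)
      rw [hd]
      simp only [if_false, Bool.false_eq_true, if_true]
      have hstep := pv_stepA_eq_fold g hnd
      obtain ⟨hnd', hperm'⟩ :=
        pv_fold_invariants (pvRobotsB g) PySem.Dict.empty List.nodup_nil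
      rw [← hstep] at hnd' hperm'
      have hne' : ∀ kv ∈ (pvStepA g).items, kv.2 ≠ [] := by
        rw [hstep]
        exact pv_fold_nonempty (pvRobotsB g) PySem.Dict.empty (by intro kv hkv; cases hkv)
      have hR' : (pvRobotsB (pvStepA g)).Perm (R.map (pvToPair (c + 1))) := by
        refine hperm'.trans ?_
        show ((pvRobotsB (PySem.Dict.empty : PvD)) ++ (pvRobotsB g).map pvAdvB).Perm _
        rw [show pvRobotsB (PySem.Dict.empty : PvD) = [] from rfl, List.nil_append]
        have h4 := hperm.map pvAdvB
        rw [List.map_map] at h4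
        have h5 : R.map (pvAdvB ∘ pvToPair c) = R.map (pvToPair (c + 1)) :=
          List.map_congr_left (fun r _ => pv_adv_toPair c r)
        rw [h5] at h4
        exact h4
      exact pv_loop_eq fuel (pvStepA g) R (c + 1)
        (by push_cast at hc ⊢; omega) hnd' hne' hR'

-- B's upfront dict check decides the same condition as A's first while-test
theorem pv_allone_iff (d : PvD) :
    (d.values.all (fun vectors => vectors.length == 1) = true ↔
      ∀ kv ∈ d.items, kv.2.length = 1) := by
  have hv : d.values = d.items.map Prod.snd := rfl
  rw [hv, List.all_map, List.all_eq_true]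
  constructor
  · intro h kv hkv
    simpa using h kv hkv
  · intro h kv hkv
    simpa using h kv hkv

-- ===== VERDICT (by name: the statement is the Claim_ definition above) =====
theorem part_two_spec : Claim_equal_part_two := by
  intro grid _
  show part_two grid = part_two_alt grid
  unfold part_two part_two_alt
  have hnd : (pvDictOf grid).keys.Nodup := PySem.Dict.nodup_keys_ofList _
  have hiff : pvCondA (pvDictOf grid) = false ↔
      (pvDictOf grid).values.all (fun vectors => vectors.length == 1) = true := by
    rw [pv_cond_false_iff _ hnd, pv_allone_iff]
  cases hcond : pvCondA (pvDictOf grid) with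
  | false =>
    rw [if_pos (hiff.1 hcond)]
    rw [show (10403 : Nat) = 10402 + 1 by norm_num]
    show (if pvCondA (pvDictOf grid) then pvLoopA 10402 (pvStepA (pvDictOf grid)) (0 + 1) else 0) = 0
    rw [hcond]
    simp
  | true =>
    have hfalse : (pvDictOf grid).values.all (fun vectors => vectors.length == 1) = false := by
      cases h : (pvDictOf grid).values.all (fun vectors => vectors.length == 1) with
      | false => rfl
      | true =>
        have h2 := hiff.2 h
        rw [hcond] at h2
        exact absurd h2 (by decide)
    rw [if_neg (by rw [hfalse]; exact Bool.false_ne_true)]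
    rw [show (10403 : Nat) = 10402 + 1 by norm_num]
    show (if pvCondA (pvDictOf grid) then pvLoopA 10402 (pvStepA (pvDictOf grid)) (0 + 1) else 0) =
      pvSearchB (PySem.List.pyRange 1 (101 * 103) 1) (pvRobotsFlat (pvDictOf grid))
    rw [hcond]
    simp only [if_true]
    rw [show ((101 : Int) * 103) = 10403 by norm_num]
    have hstep := pv_stepA_eq_fold (pvDictOf grid) hnd
    obtain ⟨hnd', hperm'⟩ :=
      pv_fold_invariants (pvRobotsB (pvDictOf grid)) PySem.Dict.empty List.nodup_nil
    rw [← hstep] at hnd' hperm'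
    have hne' : ∀ kv ∈ (pvStepA (pvDictOf grid)).items, kv.2 ≠ [] := by
      rw [hstep]
      exact pv_fold_nonempty (pvRobotsB (pvDictOf grid)) PySem.Dict.empty
        (by intro kv hkv; cases hkv)
    have hR' : (pvRobotsB (pvStepA (pvDictOf grid))).Perm
        ((pvRobotsFlat (pvDictOf grid)).map (pvToPair 1)) := by
      refine hperm'.trans ?_
      show ((pvRobotsB (PySem.Dict.empty : PvD)) ++ (pvRobotsB (pvDictOf grid)).map pvAdvB).Perm _
      rw [show pvRobotsB (PySem.Dict.empty : PvD) = [] from rfl, List.nil_append,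
          pv_robotsB_adv_one]
    exact pv_loop_eq 10402 (pvStepA (pvDictOf grid)) (pvRobotsFlat (pvDictOf grid)) (0 + 1)
      (by norm_num) hnd' hne' hR'
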